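-- pv_equiv track=rewrite | github.com/ThoAppelsin/Wordle-Player | bot.py | simulateResultsMutual
-- ===== SOURCE A (Python) =====
-- puzzleLen = 5
--
-- def resultsToNum(results):
--     return sum(x * 3 ** i for i, x in enumerate(results))
--
-- def simulateResultsMutual(A, B):
--     resA = [0] * puzzleLen
--     resB = [0] * puzzleLen
--
--     A = list(A)
--     B = list(B)
--     for i in range(puzzleLen):
--         if A[i] == B[i]:
--             resA[i] = resB[i] = 2
--             A[i] = B[i] = None
--     for i in range(puzzleLen):
--         if resA[i] == 0:
--             for j in range(puzzleLen):
--                 if A[i] == B[j]: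
--                     resA[i] = resB[j] = 1
--                     A[i] = B[j] = None
--                     break
--     return resultsToNum(resA), resultsToNum(resB)
-- ===== SOURCE B (Python) =====
-- puzzleLen = 5
--
-- def resultsToNum(results):
--     return sum(x * 3 ** i for i, x in enumerate(results))
--
-- def simulateResultsMutual(A, B):
--     a = [A[i] for i in range(puzzleLen)]
--     b = [B[i] for i in range(puzzleLen)]
--     green = [a[i] == b[i] for i in range(puzzleLen)]
--
--     def countBefore(s, i, c):
--         return sum(1 for j in range(i) if not green[j] and s[j] == c)
--
--     def quota(c):
--         return min(countBefore(a, puzzleLen, c), countBefore(b, puzzleLen, c))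
--
--     def mark(s):
--         return [2 if green[i] else
--                 1 if countBefore(s, i, s[i]) < quota(s[i]) else
--                 0 for i in range(puzzleLen)]
--
--     return resultsToNum(mark(a)), resultsToNum(mark(b))
-- ===== Notes on version B (the rewrite author's own statement) =====
-- stated objective: simpler
-- what changed: Replaces the mutable greedy search-and-consume second loop (scanning B and erasing matched letters in place) by a pure closed-form per position: a position is yellow iff its rank among non-green occurrences of its letter is below min(countA, countB) of that letter's non-green counts, computed by two independent marking passes with no mutation; B also only ever reads the first puzzleLen characters, while A copies both whole strings with list().
import Mathlib
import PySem

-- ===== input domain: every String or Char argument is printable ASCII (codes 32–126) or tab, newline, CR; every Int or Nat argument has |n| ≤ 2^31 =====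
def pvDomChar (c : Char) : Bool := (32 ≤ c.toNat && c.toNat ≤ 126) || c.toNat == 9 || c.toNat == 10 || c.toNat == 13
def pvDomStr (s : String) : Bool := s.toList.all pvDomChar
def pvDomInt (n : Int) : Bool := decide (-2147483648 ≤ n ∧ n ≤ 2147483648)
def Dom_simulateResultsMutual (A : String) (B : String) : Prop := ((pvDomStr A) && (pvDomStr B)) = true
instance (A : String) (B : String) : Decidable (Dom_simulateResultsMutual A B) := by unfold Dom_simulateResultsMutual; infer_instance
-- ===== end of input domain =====

-- B replaces A's in-place greedy consume-and-break yellow matching by a pure rank/quota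
-- count per position (objective: simpler); return values agree on all strings of length ≥ 5.

-- ===== PORT A =====
def resultsToNum (results : List Int) : Int :=
  (PySem.List.enumerate results).foldl (fun acc p => acc + p.2 * 3 ^ p.1.toNat) 0

-- loop body of A's first (green) pass
def stepGreenA (s : List Int × List Int × List (Option Char) × List (Option Char)) (i : Nat) :
    List Int × List Int × List (Option Char) × List (Option Char) :=
  let (resA, resB, la, lb) := s
  if la.getD i none == lb.getD i none then
    (resA.set i 2, resB.set i 2, la.set i none, lb.set i none)
  else s

-- loop body of A's second (yellow) pass; the inner `for j … break` is the first-match search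
def stepYellowA (s : List Int × List Int × List (Option Char) × List (Option Char)) (i : Nat) :
    List Int × List Int × List (Option Char) × List (Option Char) :=
  let (resA, resB, la, lb) := s
  if resA.getD i 0 == 0 then
    match (List.range 5).find? (fun j => la.getD i none == lb.getD j none) with
    | some j => (resA.set i 1, resB.set j 1, la.set i none, lb.set j none)
    | none => (resA, resB, la, lb)
  else s

def simulateResultsMutual (A : String) (B : String) : Int × Int :=
  let s1 := (List.range 5).foldl stepGreenA
      (List.replicate 5 (0:Int), List.replicate 5 (0:Int), A.toList.map some, B.toList.map some)
  let s2 := (List.range 5).foldl stepYellowA s1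
  (resultsToNum s2.1, resultsToNum s2.2.1)

-- ===== PORT B =====
def resultsToNumB (results : List Int) : Int :=
  (PySem.List.enumerate results).foldl (fun acc p => acc + p.2 * 3 ^ p.1.toNat) 0

-- Source B's countBefore: non-green occurrences of c in s strictly before position i
def countBeforeB (green : List Bool) (s : List Char) (i : Nat) (c : Char) : Nat :=
  ((List.range i).filter (fun j => !(green.getD j false) && (s.getD j ' ' == c))).length

-- Source B's quota: min of the two non-green letter counts
def quotaB (green : List Bool) (a b : List Char) (c : Char) : Nat :=
  min (countBeforeB green a 5 c) (countBeforeB green b 5 c)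

-- Source B's mark: pure per-position marking by rank vs quota
def markB (green : List Bool) (a b : List Char) (s : List Char) : List Int :=
  (List.range 5).map (fun i =>
    if green.getD i false then (2:Int)
    else if countBeforeB green s i (s.getD i ' ') < quotaB green a b (s.getD i ' ') then 1 else 0)

def simulateResultsMutual_alt (A : String) (B : String) : Int × Int :=
  let a := (List.range 5).map (fun i => A.toList.getD i ' ')
  let b := (List.range 5).map (fun i => B.toList.getD i ' ')
  let green := (List.range 5).map (fun i => a.getD i ' ' == b.getD i ' ')
  (resultsToNumB (markB green a b a), resultsToNumB (markB green a b b))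

-- ===== PRECONDITION & SPEC =====
-- Python A indexes A[i], B[i] for i in range(5): it raises IndexError iff either string is
-- shorter than 5; exactly those inputs are excluded.
def Pre_simulateResultsMutual (A : String) (B : String) : Prop :=
  5 ≤ A.toList.length ∧ 5 ≤ B.toList.length
instance (A : String) (B : String) : Decidable (Pre_simulateResultsMutual A B) := by
  unfold Pre_simulateResultsMutual; infer_instance
def pvWitness_simulateResultsMutual : String × String := ("crane", "maces")

def Spec_simulateResultsMutual (A : String) (B : String) (out : Int × Int) : Prop := out = simulateResultsMutual_alt A B
instance (A : String) (B : String) (out : Int × Int) : Decidable (Spec_simulateResultsMutual A B out) := by unfold Spec_simulateResultsMutual; infer_instance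

-- ===== CLAIM (what is proved, stated in full; the proofs are below) =====
def Claim_equal_simulateResultsMutual : Prop := ∀ (A : String) (B : String), Dom_simulateResultsMutual A B → Pre_simulateResultsMutual A B → Spec_simulateResultsMutual A B (simulateResultsMutual A B)

-- ===== LEMMAS AND PROOFS =====

-- ---- generic list-index helpers ----
theorem pvGetD_take (l : List Char) (i : Nat) (d : Char) (h : i < 5) :
    (l.take 5).getD i d = l.getD i d := by
  simp [List.getD_eq_getElem?_getD, List.getElem?_take, h]

theorem pvGetD_take_opt (l : List (Option Char)) (i : Nat) (h : i < 5) :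
    (l.take 5).getD i none = l.getD i none := by
  simp [List.getD_eq_getElem?_getD, List.getElem?_take, h]

theorem pvGetD_map_range {α : Type} (n : Nat) (f : Nat → α) (i : Nat) (d : α) (h : i < n) :
    ((List.range n).map f).getD i d = f i := by
  simp [List.getD_eq_getElem?_getD, h]

theorem pvSet_map_range {α : Type} (n j : Nat) (f : Nat → α) (x : α) (h : j < n) :
    ((List.range n).map f).set j x = (List.range n).map (fun i => if i = j then x else f i) := by
  apply List.ext_getElem
  · simp
  · intro i hi _
    simp only [List.getElem_set, List.getElem_map, List.getElem_range]
    rcases eq_or_ne i j with h' | h'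
    · subst h'; simp
    · rw [if_neg (fun hh => h' hh.symm), if_neg h']

theorem pvMap_range_congr {α : Type} (n : Nat) (f g : Nat → α) (h : ∀ i < n, f i = g i) :
    (List.range n).map f = (List.range n).map g := by
  apply List.map_congr_left; simpa using h

theorem pvFind?_congr {α : Type} (p q : α → Bool) (l : List α) (h : ∀ x ∈ l, p x = q x) :
    l.find? p = l.find? q := by
  induction l with
  | nil => rfl
  | cons a t ih =>
    simp only [List.find?]; rw [h a (by simp)]
    split
    · rfl
    · exact ih (fun x hx => h x (by simp [hx]))

theorem pvFind?_range_eq_none (p : Nat → Bool) (n : Nat) (h : ∀ j < n, p j = false) :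
    (List.range n).find? p = none := by
  apply List.find?_eq_none.mpr
  intro x hx
  simp only [List.mem_range] at hx
  simp [h x hx]

theorem pvFind?_range_eq_some (p : Nat → Bool) (j : Nat) (hpj : p j = true)
    (hmin : ∀ i < j, p i = false) : ∀ n, j < n → (List.range n).find? p = some j := by
  intro n
  induction n with
  | zero => omega
  | succ m ih =>
    intro h
    rw [List.range_succ, List.find?_append]
    rcases Nat.lt_or_ge j m with hjm | hjm
    · rw [ih hjm]; rfl
    · have hjm' : m = j := by omega
      rw [hjm', pvFind?_range_eq_none p j hmin]
      simp [List.find?, hpj]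

-- ---- the abstract quantities of the matching ----
-- green test at position i
def gA (a b : List Char) (i : Nat) : Bool := a.getD i ' ' == b.getD i ' '
-- non-green occurrences of c in s strictly before i
def cnt (a b s : List Char) (i : Nat) (c : Char) : Nat :=
  ((List.range i).filter (fun j => !(gA a b j) && (s.getD j ' ' == c))).length

theorem cnt_succ (a b s : List Char) (k : Nat) (c : Char) :
    cnt a b s (k+1) c =
      if !(gA a b k) && (s.getD k ' ' == c) then cnt a b s k c + 1 else cnt a b s k c := by
  simp only [cnt, List.range_succ, List.filter_append]
  split <;> simp_all

theorem cnt_mono (a b s : List Char) (i j : Nat) (c : Char) : i ≤ j → cnt a b s i c ≤ cnt a b s j c := by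
  induction j with
  | zero =>
    intro h
    have : i = 0 := by omega
    subst this; exact le_rfl
  | succ m ih =>
    intro h
    rcases Nat.lt_or_ge i (m+1) with h' | h'
    · have := ih (by omega)
      rw [cnt_succ]; split <;> omega
    · have : i = m + 1 := by omega
      subst this; exact le_rfl

theorem cnt_lt_of_occ (a b s : List Char) (j n : Nat) (c : Char) (hj : j < n)
    (hg : gA a b j = false) (hc : s.getD j ' ' = c) :
    cnt a b s j c < cnt a b s n c := by
  have hb' : (!(gA a b j) && (s.getD j ' ' == c)) = true := by rw [hc]; simp [hg]
  have h1 : cnt a b s (j+1) c = cnt a b s j c + 1 := by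
    rw [cnt_succ, if_pos hb']
  have h2 := cnt_mono a b s (j+1) n c (by omega)
  omega

theorem cnt_exists (a b s : List Char) (j : Nat) (c : Char) :
    ∀ m, m < cnt a b s j c →
      ∃ j' < j, gA a b j' = false ∧ s.getD j' ' ' = c ∧ cnt a b s j' c = m := by
  induction j with
  | zero => intro m hm; simp [cnt] at hm
  | succ k ih =>
    intro m hm
    rw [cnt_succ] at hm
    by_cases hocc : (!(gA a b k) && (s.getD k ' ' == c)) = true
    · simp only [hocc, if_pos] at hm
      rcases Nat.lt_or_ge m (cnt a b s k c) with h' | h'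
      · obtain ⟨j', hj', h1, h2, h3⟩ := ih m h'
        exact ⟨j', by omega, h1, h2, h3⟩
      · have : m = cnt a b s k c := by omega
        subst this
        simp only [Bool.and_eq_true, Bool.not_eq_true', beq_iff_eq] at hocc
        exact ⟨k, by omega, hocc.1, hocc.2, rfl⟩
    · simp only [hocc, if_neg, Bool.false_eq_true, not_false_iff] at hm
      obtain ⟨j', hj', h1, h2, h3⟩ := ih m (by simpa using hm)
      exact ⟨j', by omega, h1, h2, h3⟩

theorem cnt_inj (a b s : List Char) (j1 j2 : Nat) (c : Char)
    (hg1 : gA a b j1 = false) (hc1 : s.getD j1 ' ' = c)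
    (hg2 : gA a b j2 = false) (hc2 : s.getD j2 ' ' = c)
    (h : cnt a b s j1 c = cnt a b s j2 c) : j1 = j2 := by
  rcases Nat.lt_trichotomy j1 j2 with h' | h' | h'
  · have := cnt_lt_of_occ a b s j1 j2 c h' hg1 hc1; omega
  · exact h'
  · have := cnt_lt_of_occ a b s j2 j1 c h' hg2 hc2; omega

-- ---- the loop invariants ----
def fA (a b : List Char) (k i : Nat) : Int :=
  if gA a b i then 2
  else if i < k ∧ cnt a b a i (a.getD i ' ') < cnt a b b 5 (a.getD i ' ') then 1 else 0
def fB (a b : List Char) (k j : Nat) : Int :=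
  if gA a b j then 2
  else if cnt a b b j (b.getD j ' ') < cnt a b a k (b.getD j ' ') then 1 else 0
def lA (a b : List Char) (k i : Nat) : Option Char :=
  if gA a b i then none
  else if i < k ∧ cnt a b a i (a.getD i ' ') < cnt a b b 5 (a.getD i ' ') then none
  else some (a.getD i ' ')
def lB (a b : List Char) (k j : Nat) : Option Char :=
  if gA a b j then none
  else if cnt a b b j (b.getD j ' ') < cnt a b a k (b.getD j ' ') then none
  else some (b.getD j ' ')
def invSt (a b : List Char) (k : Nat) :
    List Int × List Int × List (Option Char) × List (Option Char) :=
  ((List.range 5).map (fA a b k), (List.range 5).map (fB a b k),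
   (List.range 5).map (lA a b k), (List.range 5).map (lB a b k))

-- state after k steps of the green pass
def inv1 (a b : List Char) (k : Nat) :
    List Int × List Int × List (Option Char) × List (Option Char) :=
  ((List.range 5).map (fun i => if i < k ∧ gA a b i then (2:Int) else 0),
   (List.range 5).map (fun i => if i < k ∧ gA a b i then (2:Int) else 0),
   (List.range 5).map (fun i => if i < k ∧ gA a b i then none else some (a.getD i ' ')),
   (List.range 5).map (fun i => if i < k ∧ gA a b i then none else some (b.getD i ' ')))

theorem step1_inv (a b : List Char) (k : Nat) (hk : k < 5) :
    stepGreenA (inv1 a b k) k = inv1 a b (k+1) := by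
  unfold stepGreenA inv1
  simp only []
  rw [pvGetD_map_range 5 _ k none hk, pvGetD_map_range 5 _ k (none : Option Char) hk]
  simp only [Nat.lt_irrefl, false_and, if_false]
  have hcond : (some (a.getD k ' ') == some (b.getD k ' ')) = gA a b k := rfl
  rw [hcond]
  by_cases hg : gA a b k = true
  · rw [if_pos hg]
    rw [pvSet_map_range 5 k _ (2:Int) hk, pvSet_map_range 5 k _ (none : Option Char) hk,
        pvSet_map_range 5 k _ (none : Option Char) hk]
    simp only [Prod.mk.injEq]
    refine ⟨?_, ?_, ?_, ?_⟩ <;>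
      (apply pvMap_range_congr; intro i hi;
       rcases eq_or_ne i k with h' | h'
       · subst h'; simp [hg]
       · by_cases hik : i < k
         · have hik1 : i < k + 1 := by omega
           simp [h', hik, hik1]
         · have hik1 : ¬ (i < k + 1) := by omega
           simp [h', hik, hik1])
  · rw [if_neg hg]
    simp only [Prod.mk.injEq]
    refine ⟨?_, ?_, ?_, ?_⟩ <;>
      (apply pvMap_range_congr; intro i hi;
       rcases eq_or_ne i k with h' | h'
       · subst h'; simp [hg]
       · by_cases hik : i < k
         · have hik1 : i < k + 1 := by omega
           simp [hik, hik1]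
         · have hik1 : ¬ (i < k + 1) := by omega
           simp [hik, hik1])

theorem fA_shift (a b : List Char) (k i : Nat) (h : i ≠ k) : fA a b (k+1) i = fA a b k i := by
  unfold fA
  by_cases hgi : gA a b i = true
  · rw [if_pos hgi, if_pos hgi]
  · rw [if_neg hgi, if_neg hgi]
    have hiff : (i < k+1 ∧ cnt a b a i (a.getD i ' ') < cnt a b b 5 (a.getD i ' ')) ↔
        (i < k ∧ cnt a b a i (a.getD i ' ') < cnt a b b 5 (a.getD i ' ')) := by
      constructor <;> (rintro ⟨h1, h3⟩; exact ⟨by omega, h3⟩)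
    rw [if_congr hiff rfl rfl]

theorem lA_shift (a b : List Char) (k i : Nat) (h : i ≠ k) : lA a b (k+1) i = lA a b k i := by
  unfold lA
  by_cases hgi : gA a b i = true
  · rw [if_pos hgi, if_pos hgi]
  · rw [if_neg hgi, if_neg hgi]
    have hiff : (i < k+1 ∧ cnt a b a i (a.getD i ' ') < cnt a b b 5 (a.getD i ' ')) ↔
        (i < k ∧ cnt a b a i (a.getD i ' ') < cnt a b b 5 (a.getD i ' ')) := by
      constructor <;> (rintro ⟨h1, h3⟩; exact ⟨by omega, h3⟩)
    rw [if_congr hiff rfl rfl]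

theorem step2_inv (a b : List Char) (k : Nat) (hk : k < 5) :
    stepYellowA (invSt a b k) k = invSt a b (k+1) := by
  unfold stepYellowA invSt
  simp only []
  rw [pvGetD_map_range 5 (fA a b k) k 0 hk]
  by_cases hg : gA a b k = true
  · -- k is green: resA[k] = 2 ≠ 0, the step does nothing
    have h2 : fA a b k k = 2 := by unfold fA; rw [if_pos hg]
    rw [h2, if_neg (show ¬ (((2:Int) == 0) = true) by decide)]
    have hcA : ∀ c, cnt a b a (k+1) c = cnt a b a k c := by
      intro c; rw [cnt_succ]; simp [hg]
    simp only [Prod.mk.injEq]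
    refine ⟨?_, ?_, ?_, ?_⟩
    · apply pvMap_range_congr; intro i hi
      rcases eq_or_ne i k with h' | h'
      · subst h'; unfold fA; rw [if_pos hg, if_pos hg]
      · exact (fA_shift a b k i h').symm
    · apply pvMap_range_congr; intro i hi
      unfold fB; rw [hcA]
    · apply pvMap_range_congr; intro i hi
      rcases eq_or_ne i k with h' | h'
      · subst h'; unfold lA; rw [if_pos hg, if_pos hg]
      · exact (lA_shift a b k i h').symm
    · apply pvMap_range_congr; intro i hi
      unfold lB; rw [hcA]
  · -- k is not green: resA[k] = 0, the inner search runs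
    have h0 : fA a b k k = 0 := by
      unfold fA; rw [if_neg hg, if_neg (fun h => absurd h.1 (Nat.lt_irrefl k))]
    rw [h0, if_pos (show ((0:Int) == 0) = true by decide),
        pvGetD_map_range 5 (lA a b k) k none hk]
    have hla : lA a b k k = some (a.getD k ' ') := by
      unfold lA; rw [if_neg hg, if_neg (fun h => absurd h.1 (Nat.lt_irrefl k))]
    rw [hla,
        pvFind?_congr _ (fun j => some (a.getD k ' ') == lB a b k j) _
          (by intro x hx; simp only [List.mem_range] at hx
              rw [pvGetD_map_range 5 (lB a b k) x none hx])]
    -- how the search predicate reads on the invariant state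
    have hq : ∀ j, ((some (a.getD k ' ') == lB a b k j) = true) ↔
        (gA a b j = false ∧ b.getD j ' ' = a.getD k ' ' ∧
         cnt a b a k (a.getD k ' ') ≤ cnt a b b j (a.getD k ' ')) := by
      intro j
      unfold lB
      by_cases h1 : gA a b j = true
      · simp [h1]
      · rw [if_neg h1]
        by_cases h2 : cnt a b b j (b.getD j ' ') < cnt a b a k (b.getD j ' ')
        · rw [if_pos h2]
          constructor
          · intro h; exact absurd h (by simp)
          · rintro ⟨hg', hbc, hge⟩
            rw [hbc] at h2; omega
        · rw [if_neg h2]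
          constructor
          · intro h
            have hcb : a.getD k ' ' = b.getD j ' ' := by simpa using h
            refine ⟨by simpa using h1, hcb.symm, ?_⟩
            rw [← hcb] at h2; omega
          · rintro ⟨hg', hbc, hge⟩
            rw [hbc]
            simp
    -- successful-search shift for the B side
    have hsucc : ∀ c', cnt a b a (k+1) c' =
        if (a.getD k ' ' == c') = true then cnt a b a k c' + 1 else cnt a b a k c' := by
      intro c'; rw [cnt_succ]; simp [hg]
    by_cases hr : cnt a b a k (a.getD k ' ') < cnt a b b 5 (a.getD k ' ')
    · -- B still has an unconsumed copy of the letter: the search succeeds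
      obtain ⟨j', hj5, hgj, hcj, hcntj⟩ :=
        cnt_exists a b b 5 (a.getD k ' ') (cnt a b a k (a.getD k ' ')) hr
      have hfind : (List.range 5).find? (fun j => some (a.getD k ' ') == lB a b k j) =
          some j' := by
        apply pvFind?_range_eq_some _ j' ((hq j').mpr ⟨hgj, hcj, by omega⟩) _ 5 hj5
        intro i hi
        rcases Bool.eq_false_or_eq_true (some (a.getD k ' ') == lB a b k i) with h | h
        · exfalso
          obtain ⟨hgi', hci', hgei⟩ := (hq i).mp h
          have := cnt_lt_of_occ a b b i j' (a.getD k ' ') hi hgi' hci'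
          omega
        · exact h
      rw [hfind]
      simp only []
      rw [pvSet_map_range 5 k (fA a b k) (1:Int) hk,
          pvSet_map_range 5 j' (fB a b k) (1:Int) hj5,
          pvSet_map_range 5 k (lA a b k) (none : Option Char) hk,
          pvSet_map_range 5 j' (lB a b k) (none : Option Char) hj5]
      simp only [Prod.mk.injEq]
      refine ⟨?_, ?_, ?_, ?_⟩
      · apply pvMap_range_congr; intro i hi
        rcases eq_or_ne i k with h' | h'
        · subst h'
          rw [if_pos rfl]
          unfold fA
          rw [if_neg hg, if_pos ⟨by omega, hr⟩]
        · rw [if_neg h', (fA_shift a b k i h').symm]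
      · apply pvMap_range_congr; intro j hj
        rcases eq_or_ne j j' with h' | h'
        · subst h'
          rw [if_pos rfl]
          unfold fB
          rw [if_neg (by rw [hgj]; exact Bool.false_ne_true), hcj, hsucc]
          rw [if_pos (show (a.getD k ' ' == a.getD k ' ') = true by simp)]
          rw [if_pos (show cnt a b b j (a.getD k ' ') < cnt a b a k (a.getD k ' ') + 1 by omega)]
        · rw [if_neg h']
          unfold fB
          by_cases hgj2 : gA a b j = true
          · rw [if_pos hgj2, if_pos hgj2]
          · rw [if_neg hgj2, if_neg hgj2, hsucc]
            by_cases hcc : (a.getD k ' ' == b.getD j ' ') = true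
            · rw [if_pos hcc]
              have hcb : a.getD k ' ' = b.getD j ' ' := by simpa using hcc
              have hne : cnt a b b j (b.getD j ' ') ≠ cnt a b a k (b.getD j ' ') := by
                intro heq
                apply h'
                apply cnt_inj a b b j j' (b.getD j ' ')
                  (by simpa using hgj2) rfl hgj (by rw [hcj, hcb])
                rw [heq, ← hcb, hcntj, hcb]
              have hiff : (cnt a b b j (b.getD j ' ') < cnt a b a k (b.getD j ' ')) ↔
                  (cnt a b b j (b.getD j ' ') < cnt a b a k (b.getD j ' ') + 1) := by omega
              rw [if_congr hiff rfl rfl]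
            · rw [if_neg hcc]
      · apply pvMap_range_congr; intro i hi
        rcases eq_or_ne i k with h' | h'
        · subst h'
          rw [if_pos rfl]
          unfold lA
          rw [if_neg hg, if_pos ⟨by omega, hr⟩]
        · rw [if_neg h', (lA_shift a b k i h').symm]
      · apply pvMap_range_congr; intro j hj
        rcases eq_or_ne j j' with h' | h'
        · subst h'
          rw [if_pos rfl]
          unfold lB
          rw [if_neg (by rw [hgj]; exact Bool.false_ne_true), hcj, hsucc]
          rw [if_pos (show (a.getD k ' ' == a.getD k ' ') = true by simp)]
          rw [if_pos (show cnt a b b j (a.getD k ' ') < cnt a b a k (a.getD k ' ') + 1 by omega)]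
        · rw [if_neg h']
          unfold lB
          by_cases hgj2 : gA a b j = true
          · rw [if_pos hgj2, if_pos hgj2]
          · rw [if_neg hgj2, if_neg hgj2, hsucc]
            by_cases hcc : (a.getD k ' ' == b.getD j ' ') = true
            · rw [if_pos hcc]
              have hcb : a.getD k ' ' = b.getD j ' ' := by simpa using hcc
              have hne : cnt a b b j (b.getD j ' ') ≠ cnt a b a k (b.getD j ' ') := by
                intro heq
                apply h'
                apply cnt_inj a b b j j' (b.getD j ' ')
                  (by simpa using hgj2) rfl hgj (by rw [hcj, hcb])
                rw [heq, ← hcb, hcntj, hcb]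
              have hiff : (cnt a b b j (b.getD j ' ') < cnt a b a k (b.getD j ' ')) ↔
                  (cnt a b b j (b.getD j ' ') < cnt a b a k (b.getD j ' ') + 1) := by omega
              rw [if_congr hiff rfl rfl]
            · rw [if_neg hcc]
    · -- B has no unconsumed copy left: the search fails, nothing happens
      have hfind : (List.range 5).find? (fun j => some (a.getD k ' ') == lB a b k j) =
          none := by
        apply pvFind?_range_eq_none
        intro j hj
        rcases Bool.eq_false_or_eq_true (some (a.getD k ' ') == lB a b k j) with h | h
        · exfalso
          obtain ⟨hgj2, hcj2, hge⟩ := (hq j).mp h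
          have := cnt_lt_of_occ a b b j 5 (a.getD k ' ') hj hgj2 hcj2
          omega
        · exact h
      rw [hfind]
      simp only [Prod.mk.injEq]
      refine ⟨?_, ?_, ?_, ?_⟩
      · apply pvMap_range_congr; intro i hi
        rcases eq_or_ne i k with h' | h'
        · subst h'
          rw [h0]
          unfold fA
          rw [if_neg hg, if_neg (fun h => hr h.2)]
        · exact (fA_shift a b k i h').symm
      · apply pvMap_range_congr; intro j hj
        unfold fB
        by_cases hgj2 : gA a b j = true
        · rw [if_pos hgj2, if_pos hgj2]
        · rw [if_neg hgj2, if_neg hgj2, hsucc]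
          by_cases hcc : (a.getD k ' ' == b.getD j ' ') = true
          · rw [if_pos hcc]
            have hcb : a.getD k ' ' = b.getD j ' ' := by simpa using hcc
            have hlt := cnt_lt_of_occ a b b j 5 (b.getD j ' ') hj (by simpa using hgj2) rfl
            rw [hcb] at hr
            rw [if_pos (by omega), if_pos (by omega)]
          · rw [if_neg hcc]
      · apply pvMap_range_congr; intro i hi
        rcases eq_or_ne i k with h' | h'
        · subst h'
          rw [hla]
          unfold lA
          rw [if_neg hg, if_neg (fun h => hr h.2)]
        · exact (lA_shift a b k i h').symm
      · apply pvMap_range_congr; intro j hj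
        unfold lB
        by_cases hgj2 : gA a b j = true
        · rw [if_pos hgj2, if_pos hgj2]
        · rw [if_neg hgj2, if_neg hgj2, hsucc]
          by_cases hcc : (a.getD k ' ' == b.getD j ' ') = true
          · rw [if_pos hcc]
            have hcb : a.getD k ' ' = b.getD j ' ' := by simpa using hcc
            have hlt := cnt_lt_of_occ a b b j 5 (b.getD j ' ') hj (by simpa using hgj2) rfl
            rw [hcb] at hr
            rw [if_pos (by omega), if_pos (by omega)]
          · rw [if_neg hcc]

theorem map_some_range (a : List Char) (ha : a.length = 5) :
    a.map some = (List.range 5).map (fun i => some (a.getD i ' ')) := by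
  apply List.ext_getElem
  · simp [ha]
  · intro i h1 h2
    simp only [List.getElem_map, List.getElem_range]
    rw [List.getD_eq_getElem a ' ' (by simp at h1; omega)]

theorem core_eval (a b : List Char) (ha : a.length = 5) (hb : b.length = 5) :
    (List.range 5).foldl stepYellowA ((List.range 5).foldl stepGreenA
      (List.replicate 5 (0:Int), List.replicate 5 (0:Int), a.map some, b.map some)) =
    invSt a b 5 := by
  have hinit : (List.replicate 5 (0:Int), List.replicate 5 (0:Int), a.map some, b.map some) =
      inv1 a b 0 := by
    unfold inv1
    simp only [Nat.not_lt_zero, false_and, if_false]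
    refine congrArg₂ Prod.mk ?_ (congrArg₂ Prod.mk ?_ (congrArg₂ Prod.mk ?_ ?_))
    · apply List.ext_getElem <;> simp
    · apply List.ext_getElem <;> simp
    · exact map_some_range a ha
    · exact map_some_range b hb
  rw [hinit]
  have h5 : List.range 5 = [0, 1, 2, 3, 4] := rfl
  rw [h5]
  simp only [List.foldl_cons, List.foldl_nil]
  rw [step1_inv a b 0 (by omega), step1_inv a b 1 (by omega), step1_inv a b 2 (by omega),
      step1_inv a b 3 (by omega), step1_inv a b 4 (by omega)]
  have hmid : inv1 a b 5 = invSt a b 0 := by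
    unfold inv1 invSt fA fB lA lB
    simp only [Prod.mk.injEq]
    refine ⟨?_, ?_, ?_, ?_⟩ <;>
      (apply pvMap_range_congr; intro i hi;
       by_cases hgi : gA a b i = true <;> simp [hgi, hi, cnt])
  rw [hmid]
  rw [step2_inv a b 0 (by omega), step2_inv a b 1 (by omega), step2_inv a b 2 (by omega),
      step2_inv a b 3 (by omega), step2_inv a b 4 (by omega)]

-- ---- truncation: port A only looks at the first five characters ----
def pvTrunc (s : List Int × List Int × List (Option Char) × List (Option Char)) :
    List Int × List Int × List (Option Char) × List (Option Char) :=
  (s.1, s.2.1, s.2.2.1.take 5, s.2.2.2.take 5)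

theorem pvTrunc_fst (s : List Int × List Int × List (Option Char) × List (Option Char)) :
    (pvTrunc s).1 = s.1 := rfl

theorem pvTrunc_snd_fst (s : List Int × List Int × List (Option Char) × List (Option Char)) :
    (pvTrunc s).2.1 = s.2.1 := rfl

theorem stepGreen_trunc (s : List Int × List Int × List (Option Char) × List (Option Char))
    (i : Nat) (hi : i < 5) : stepGreenA (pvTrunc s) i = pvTrunc (stepGreenA s i) := by
  obtain ⟨r1, r2, la, lb⟩ := s
  unfold stepGreenA pvTrunc
  simp only []
  rw [pvGetD_take_opt la i hi, pvGetD_take_opt lb i hi]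
  split
  · simp [List.take_set]
  · rfl

theorem stepYellow_trunc (s : List Int × List Int × List (Option Char) × List (Option Char))
    (i : Nat) (hi : i < 5) : stepYellowA (pvTrunc s) i = pvTrunc (stepYellowA s i) := by
  obtain ⟨r1, r2, la, lb⟩ := s
  unfold stepYellowA pvTrunc
  simp only []
  rw [pvGetD_take_opt la i hi]
  have hfind : (List.range 5).find? (fun j => la.getD i none == (lb.take 5).getD j none) =
      (List.range 5).find? (fun j => la.getD i none == lb.getD j none) := by
    apply pvFind?_congr
    intro x hx
    simp only [List.mem_range] at hx
    rw [pvGetD_take_opt lb x hx]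
  rw [hfind]
  split
  · cases hfd : (List.range 5).find? (fun j => la.getD i none == lb.getD j none) with
    | none => rfl
    | some j =>
      have hj5 : j < 5 := by
        have := List.mem_of_find?_eq_some hfd
        simpa using this
      simp [List.take_set]
  · rfl

theorem foldl_trunc (f : (List Int × List Int × List (Option Char) × List (Option Char)) → Nat →
      (List Int × List Int × List (Option Char) × List (Option Char)))
    (hf : ∀ s i, i < 5 → f (pvTrunc s) i = pvTrunc (f s i))
    (l : List Nat) (hl : ∀ i ∈ l, i < 5)
    (s : List Int × List Int × List (Option Char) × List (Option Char)) :
    l.foldl f (pvTrunc s) = pvTrunc (l.foldl f s) := by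
  induction l generalizing s with
  | nil => rfl
  | cons x t ih =>
    simp only [List.foldl_cons]
    rw [hf s x (hl x (by simp))]
    exact ih (fun i hi => hl i (by simp [hi])) _

theorem portA_eval (A B : String) (ha : 5 ≤ A.toList.length) (hb : 5 ≤ B.toList.length) :
    simulateResultsMutual A B =
      (resultsToNum ((List.range 5).map (fA (A.toList.take 5) (B.toList.take 5) 5)),
       resultsToNum ((List.range 5).map (fB (A.toList.take 5) (B.toList.take 5) 5))) := by
  have ha5 : (A.toList.take 5).length = 5 := by rw [List.length_take]; omega
  have hb5 : (B.toList.take 5).length = 5 := by rw [List.length_take]; omega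
  unfold simulateResultsMutual
  simp only []
  set S := (List.range 5).foldl stepYellowA ((List.range 5).foldl stepGreenA
      (List.replicate 5 (0:Int), List.replicate 5 (0:Int), A.toList.map some, B.toList.map some))
    with hSdef
  have hS : pvTrunc S = invSt (A.toList.take 5) (B.toList.take 5) 5 := by
    rw [hSdef,
        ← foldl_trunc stepYellowA stepYellow_trunc (List.range 5) (by intro i hi; simpa using hi),
        ← foldl_trunc stepGreenA stepGreen_trunc (List.range 5) (by intro i hi; simpa using hi)]
    have hti : pvTrunc (List.replicate 5 (0:Int), List.replicate 5 (0:Int),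
        A.toList.map some, B.toList.map some) =
        (List.replicate 5 (0:Int), List.replicate 5 (0:Int),
         (A.toList.take 5).map some, (B.toList.take 5).map some) := by
      unfold pvTrunc
      simp [List.map_take]
    rw [hti, core_eval _ _ ha5 hb5]
  have h1 : S.1 = (invSt (A.toList.take 5) (B.toList.take 5) 5).1 := by
    rw [← pvTrunc_fst S, hS]
  have h2 : S.2.1 = (invSt (A.toList.take 5) (B.toList.take 5) 5).2.1 := by
    rw [← pvTrunc_snd_fst S, hS]
  rw [h1, h2]
  rfl

theorem portB_eval (A B : String) (ha : 5 ≤ A.toList.length) (hb : 5 ≤ B.toList.length) :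
    simulateResultsMutual_alt A B =
      (resultsToNum ((List.range 5).map (fA (A.toList.take 5) (B.toList.take 5) 5)),
       resultsToNum ((List.range 5).map (fB (A.toList.take 5) (B.toList.take 5) 5))) := by
  have hRN : resultsToNumB = resultsToNum := rfl
  set a := A.toList.take 5 with hadef
  set b := B.toList.take 5 with hbdef
  set a' := (List.range 5).map (fun i => A.toList.getD i ' ') with ha'def
  set b' := (List.range 5).map (fun i => B.toList.getD i ' ') with hb'def
  set g := (List.range 5).map (fun i => a'.getD i ' ' == b'.getD i ' ') with hgdef
  have hdef : simulateResultsMutual_alt A B =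
      (resultsToNumB (markB g a' b' a'), resultsToNumB (markB g a' b' b')) := rfl
  have hga : ∀ i < 5, a'.getD i ' ' = a.getD i ' ' := by
    intro i hi
    rw [ha'def, pvGetD_map_range 5 _ i ' ' hi, hadef, pvGetD_take A.toList i ' ' hi]
  have hgb : ∀ i < 5, b'.getD i ' ' = b.getD i ' ' := by
    intro i hi
    rw [hb'def, pvGetD_map_range 5 _ i ' ' hi, hbdef, pvGetD_take B.toList i ' ' hi]
  have hgg : ∀ i < 5, g.getD i false = gA a b i := by
    intro i hi
    rw [hgdef, pvGetD_map_range 5 _ i false hi, hga i hi, hgb i hi]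
    rfl
  have hcnt : ∀ (sl sl' : List Char), (∀ j < 5, sl'.getD j ' ' = sl.getD j ' ') →
      ∀ i ≤ 5, ∀ c, countBeforeB g sl' i c = cnt a b sl i c := by
    intro sl sl' hs i hi c
    unfold countBeforeB cnt
    congr 1
    apply List.filter_congr
    intro j hj
    simp only [List.mem_range] at hj
    rw [hgg j (by omega), hs j (by omega)]
  have hmarkA : markB g a' b' a' = (List.range 5).map (fA a b 5) := by
    unfold markB quotaB
    apply pvMap_range_congr
    intro i hi
    rw [hgg i hi, hga i hi, hcnt a a' hga i (by omega), hcnt a a' hga 5 (by omega),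
        hcnt b b' hgb 5 (by omega)]
    unfold fA
    by_cases hgi : gA a b i = true
    · simp [hgi]
    · have hlt := cnt_lt_of_occ a b a i 5 (a.getD i ' ') hi (by simpa using hgi) rfl
      simp only [hgi, if_false, Bool.false_eq_true]
      split_ifs <;> omega
  have hmarkB : markB g a' b' b' = (List.range 5).map (fB a b 5) := by
    unfold markB quotaB
    apply pvMap_range_congr
    intro i hi
    rw [hgg i hi, hgb i hi, hcnt b b' hgb i (by omega), hcnt a a' hga 5 (by omega),
        hcnt b b' hgb 5 (by omega)]
    unfold fB
    by_cases hgi : gA a b i = true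
    · simp [hgi]
    · have hlt := cnt_lt_of_occ a b b i 5 (b.getD i ' ') hi (by simpa using hgi) rfl
      simp only [hgi, if_false, Bool.false_eq_true]
      split_ifs <;> omega
  rw [hdef, hmarkA, hmarkB, hRN]

-- ===== VERDICT (by name: the statement is the Claim_ definition above) =====
theorem simulateResultsMutual_spec : Claim_equal_simulateResultsMutual := by
  intro A B _ hpre
  unfold Spec_simulateResultsMutual
  rw [portA_eval A B hpre.1 hpre.2, portB_eval A B hpre.1 hpre.2]
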